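-- pv_equiv track=rewrite | github.com/w00tzenheimer/d810-ng | src/d810/optimizers/microcode/flow/flattening/hodur/strategies/direct_linearization.py | _recover_handler_body_exit
-- ===== SOURCE A (Python) =====
-- def _recover_handler_body_exit(
--     ordered_path: list[int],
--     infrastructure_blocks: frozenset[int],
-- ) -> int | None:
--     """Walk backward through DFS ordered_path, skip infrastructure blocks.
--
--     Returns the serial of the last handler-owned block before the path
--     enters dispatcher/BST/suffix infrastructure. Returns None if no
--     valid body exit is found.
--     """
--     for serial in reversed(ordered_path):
--         if serial not in infrastructure_blocks:
--             return serial
--     return None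
-- ===== SOURCE B (Python) =====
-- def _recover_handler_body_exit(
--     ordered_path: list[int],
--     infrastructure_blocks: frozenset[int],
-- ) -> int | None:
--     """Forward accumulating pass: keep overwriting with each non-infrastructure
--     serial; the final value is the last one in path order (None if none)."""
--     result = None
--     for serial in ordered_path:
--         if serial not in infrastructure_blocks:
--             result = serial
--     return result
-- ===== Notes on version B (the rewrite author's own statement) =====
-- stated objective: alternative
-- what changed: Replaces the backward early-exit scan (reversed + return on first non-infrastructure serial) with a forward full pass that overwrites an accumulator at each non-infrastructure serial and returns it at the end.
import Mathlib
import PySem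

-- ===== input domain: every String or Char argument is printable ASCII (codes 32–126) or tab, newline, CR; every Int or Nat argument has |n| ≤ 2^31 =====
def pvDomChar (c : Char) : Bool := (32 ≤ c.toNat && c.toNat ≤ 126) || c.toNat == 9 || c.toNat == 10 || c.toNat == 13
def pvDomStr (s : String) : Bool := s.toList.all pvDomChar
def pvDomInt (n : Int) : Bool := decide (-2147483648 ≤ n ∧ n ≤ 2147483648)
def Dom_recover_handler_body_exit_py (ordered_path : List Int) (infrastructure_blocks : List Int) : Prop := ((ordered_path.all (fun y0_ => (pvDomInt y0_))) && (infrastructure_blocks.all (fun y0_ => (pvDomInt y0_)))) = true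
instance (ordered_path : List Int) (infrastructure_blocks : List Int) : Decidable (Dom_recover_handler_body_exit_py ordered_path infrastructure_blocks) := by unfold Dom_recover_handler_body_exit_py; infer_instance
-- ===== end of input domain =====

-- B replaces A's backward early-exit scan by a forward full pass with an accumulator
-- that is overwritten at each non-infrastructure serial (alternative decomposition).

-- ===== PORT A =====
-- A's loop 'for serial in reversed(ordered_path): if serial not in …: return serial':
-- a front-to-back scan of the reversed list, returning on the first match.
def pvAScan (xs : List Int) (infra : List Int) : Option Int :=
  match xs with
  | [] => none
  | s :: rest => if ¬ (infra.contains s) then some s else pvAScan rest infra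

def recover_handler_body_exit_py (ordered_path : List Int) (infrastructure_blocks : List Int) : Option Int :=
  pvAScan ordered_path.reverse infrastructure_blocks

-- ===== PORT B =====
def recover_handler_body_exit_py_alt (ordered_path : List Int) (infrastructure_blocks : List Int) : Option Int :=
  ordered_path.foldl (fun result serial => if ¬ (infrastructure_blocks.contains serial) then some serial else result) none

-- ===== PRECONDITION & SPEC =====
def Spec_recover_handler_body_exit_py (ordered_path : List Int) (infrastructure_blocks : List Int) (out : Option Int) : Prop := out = recover_handler_body_exit_py_alt ordered_path infrastructure_blocks
instance (ordered_path : List Int) (infrastructure_blocks : List Int) (out : Option Int) : Decidable (Spec_recover_handler_body_exit_py ordered_path infrastructure_blocks out) := by unfold Spec_recover_handler_body_exit_py; infer_instance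

-- ===== CLAIM (what is proved, stated in full; the proofs are below) =====
def Claim_equal_recover_handler_body_exit_py : Prop := ∀ (ordered_path : List Int) (infrastructure_blocks : List Int), Dom_recover_handler_body_exit_py ordered_path infrastructure_blocks → Spec_recover_handler_body_exit_py ordered_path infrastructure_blocks (recover_handler_body_exit_py ordered_path infrastructure_blocks)

-- ===== LEMMAS AND PROOFS =====

theorem pvAScan_append (xs ys : List Int) (infra : List Int) :
    pvAScan (xs ++ ys) infra = (pvAScan xs infra).or (pvAScan ys infra) := by
  induction xs with
  | nil => simp [pvAScan]
  | cons a rest ih =>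
      simp only [List.cons_append, pvAScan]
      by_cases h : a ∈ infra
      · simp [pvAScan, h, ih]
      · simp [pvAScan, h, Option.or]

theorem pvFold_eq (l infra : List Int) (acc : Option Int) :
    l.foldl (fun result serial => if ¬ (infra.contains serial) then some serial else result) acc
      = (pvAScan l.reverse infra).or acc := by
  induction l generalizing acc with
  | nil => simp [pvAScan]
  | cons a rest ih =>
      simp only [List.foldl_cons, List.reverse_cons, pvAScan_append, Option.or_assoc]
      rw [ih]
      by_cases h : a ∈ infra <;> simp [pvAScan, h, Option.or]

-- ===== VERDICT (by name: the statement is the Claim_ definition above) =====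
theorem recover_handler_body_exit_py_spec : Claim_equal_recover_handler_body_exit_py := by
  intro ordered_path infrastructure_blocks _
  unfold Spec_recover_handler_body_exit_py recover_handler_body_exit_py recover_handler_body_exit_py_alt
  rw [pvFold_eq]
  simp
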